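-- pv_equiv track=rewrite | github.com/umraiz-ai/March_18_latest_training_compilation_running_successfully | TACHY-Compiler/compiler/src/graph_old.py | _filter_all_hit
-- ===== SOURCE A (Python) =====
-- def _filter_all_hit(targets:list, searched:list, edges):
--     pre, post = [], []
--     searched = set(searched)
--     for t in targets:
--         if len(set(in_neighbors(edges, t)) - searched) > 0:
--             post.append(t)
--         else:
--             pre.append(t)
--     return pre
--
-- def in_neighbors(edges, idx:int) -> list:
--     result = []
--     for e in edges:
--         if e[1] == idx:
--             result.append(e[0])
--     return result
-- ===== SOURCE B (Python) =====
-- def _filter_all_hit(targets: list, searched: list, edges):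
--     s = set(searched)
--     bad = {v for u, v in edges if u not in s}
--     return [t for t in targets if t not in bad]
-- ===== Notes on version B (the rewrite author's own statement) =====
-- stated objective: faster
-- what changed: Instead of scanning all edges once per target to collect in-neighbors, B makes a single edge pass building the set of targets that have an in-neighbor outside searched, then filters targets by one set lookup each.
import Mathlib
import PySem

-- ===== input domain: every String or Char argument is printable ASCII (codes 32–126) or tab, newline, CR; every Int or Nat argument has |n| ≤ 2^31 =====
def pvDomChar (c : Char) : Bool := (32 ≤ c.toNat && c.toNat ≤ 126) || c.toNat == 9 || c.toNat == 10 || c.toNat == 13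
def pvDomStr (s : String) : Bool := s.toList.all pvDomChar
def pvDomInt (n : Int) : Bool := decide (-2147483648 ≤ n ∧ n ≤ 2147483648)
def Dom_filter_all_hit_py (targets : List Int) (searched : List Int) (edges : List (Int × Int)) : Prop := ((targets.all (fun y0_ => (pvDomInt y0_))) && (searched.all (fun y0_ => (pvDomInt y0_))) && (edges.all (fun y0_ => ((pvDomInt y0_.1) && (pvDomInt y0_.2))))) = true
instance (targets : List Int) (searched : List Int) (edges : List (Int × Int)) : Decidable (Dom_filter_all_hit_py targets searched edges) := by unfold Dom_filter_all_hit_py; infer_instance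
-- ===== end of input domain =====

-- B changes the algorithm: one pass over edges to build the set of "not all hit" targets,
-- then one lookup per target (faster: O(T+E) instead of per-target edge scans).

-- ===== PORT A =====
-- in_neighbors(edges, idx): collect e[0] for every edge with e[1] == idx
def pvInNeighbors (edges : List (Int × Int)) (idx : Int) : List Int :=
  edges.foldl (fun result e => if e.2 == idx then result ++ [e.1] else result) []

-- searched = set(searched); loop appending t to post/pre; return pre
def filter_all_hit_py (targets : List Int) (searched : List Int) (edges : List (Int × Int)) : List Int :=
  (targets.foldl
    (fun (st : List Int × List Int) t =>
      if 0 < PySem.Set.len (PySem.Set.diff (PySem.Set.ofList (pvInNeighbors edges t)) (PySem.Set.ofList searched))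
      then (st.1, st.2 ++ [t])
      else (st.1 ++ [t], st.2))
    ([], [])).1

-- ===== PORT B =====
-- s = set(searched); bad = {v for (u,v) in edges if u not in s}; keep targets not in bad
def filter_all_hit_py_alt (targets : List Int) (searched : List Int) (edges : List (Int × Int)) : List Int :=
  targets.filter (fun t =>
    !(PySem.Set.contains
        (edges.foldl
          (fun bad e => if !(PySem.Set.contains (PySem.Set.ofList searched) e.1) then PySem.Set.add bad e.2 else bad)
          PySem.Set.empty) t))

-- ===== PRECONDITION & SPEC =====
def Spec_filter_all_hit_py (targets : List Int) (searched : List Int) (edges : List (Int × Int)) (out : List Int) : Prop := out = filter_all_hit_py_alt targets searched edges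
instance (targets : List Int) (searched : List Int) (edges : List (Int × Int)) (out : List Int) : Decidable (Spec_filter_all_hit_py targets searched edges out) := by unfold Spec_filter_all_hit_py; infer_instance

-- ===== CLAIM (what is proved, stated in full; the proofs are below) =====
def Claim_equal_filter_all_hit_py : Prop := ∀ (targets : List Int) (searched : List Int) (edges : List (Int × Int)), Dom_filter_all_hit_py targets searched edges → Spec_filter_all_hit_py targets searched edges (filter_all_hit_py targets searched edges)

-- ===== LEMMAS AND PROOFS =====

-- membership in A's in_neighbors
lemma mem_pvInNeighbors_aux (edges : List (Int × Int)) (t u : Int) (acc : List Int) :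
    u ∈ edges.foldl (fun result e => if e.2 == t then result ++ [e.1] else result) acc ↔
      u ∈ acc ∨ ∃ e ∈ edges, e.2 = t ∧ e.1 = u := by
  induction edges generalizing acc with
  | nil => simp
  | cons e es ih =>
    simp only [List.foldl_cons]
    by_cases h : e.2 = t
    · rw [if_pos (by simpa using h), ih]
      simp [h]
      tauto
    · rw [if_neg (by simpa using h), ih]
      simp [h]

lemma mem_pvInNeighbors (edges : List (Int × Int)) (t u : Int) :
    u ∈ pvInNeighbors edges t ↔ ∃ e ∈ edges, e.2 = t ∧ e.1 = u := by
  rw [pvInNeighbors, mem_pvInNeighbors_aux]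
  simp

-- membership in B's bad set
lemma mem_badFold (searched : List Int) (edges : List (Int × Int)) (t : Int) (acc : PySem.Set Int) :
    t ∈ edges.foldl
        (fun bad e => if !(PySem.Set.contains (PySem.Set.ofList searched) e.1) then PySem.Set.add bad e.2 else bad)
        acc ↔
      t ∈ acc ∨ ∃ e ∈ edges, e.1 ∉ searched ∧ e.2 = t := by
  induction edges generalizing acc with
  | nil => simp
  | cons e es ih =>
    simp only [List.foldl_cons]
    by_cases h : e.1 ∈ searched
    · rw [if_neg (by simp; exact h), ih]
      simp [h]
    · rw [if_pos (by simp; exact h), ih]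
      simp [h, PySem.Set.mem_add]
      tauto

-- A's two-accumulator loop: the first component is a filter
lemma fst_pairFold (c : Int → Prop) [DecidablePred c] (targets : List Int) (pre post : List Int) :
    (targets.foldl
      (fun (st : List Int × List Int) t =>
        if c t then (st.1, st.2 ++ [t]) else (st.1 ++ [t], st.2))
      (pre, post)).1 = pre ++ targets.filter (fun t => !(decide (c t))) := by
  induction targets generalizing pre post with
  | nil => simp
  | cons t ts ih =>
    by_cases h : c t
    · simp [h, ih]
    · simp [h, ih]

theorem filter_all_hit_spec_aux (targets searched : List Int) (edges : List (Int × Int)) :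
    filter_all_hit_py targets searched edges = filter_all_hit_py_alt targets searched edges := by
  unfold filter_all_hit_py filter_all_hit_py_alt
  rw [fst_pairFold]
  simp only [List.nil_append]
  apply List.filter_congr
  intro t _
  congr 1
  rw [Bool.eq_iff_iff, decide_eq_true_eq, PySem.Set.contains_iff, mem_badFold]
  constructor
  · intro h
    have hne : PySem.Set.diff (PySem.Set.ofList (pvInNeighbors edges t)) (PySem.Set.ofList searched) ≠ [] := by
      intro hnil
      simp [PySem.Set.len, hnil] at h
    obtain ⟨u, hu⟩ := List.exists_mem_of_ne_nil _ hne
    rw [PySem.Set.mem_diff, PySem.Set.mem_ofList, PySem.Set.mem_ofList, mem_pvInNeighbors] at hu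
    obtain ⟨⟨e, he, h2, h1⟩, hns⟩ := hu
    right; exact ⟨e, he, by rw [h1]; exact hns, h2⟩
  · intro h
    obtain ⟨e, he, hns, h2⟩ := h.resolve_left (by simp [PySem.Set.empty])
    have hmem : e.1 ∈ PySem.Set.diff (PySem.Set.ofList (pvInNeighbors edges t)) (PySem.Set.ofList searched) := by
      rw [PySem.Set.mem_diff, PySem.Set.mem_ofList, PySem.Set.mem_ofList, mem_pvInNeighbors]
      exact ⟨⟨e, he, h2, rfl⟩, hns⟩
    have hlen := List.length_pos_of_mem hmem
    simp only [PySem.Set.len]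
    exact_mod_cast hlen

-- ===== VERDICT (by name: the statement is the Claim_ definition above) =====
theorem filter_all_hit_py_spec : Claim_equal_filter_all_hit_py := by
  intro targets searched edges _
  unfold Spec_filter_all_hit_py
  exact filter_all_hit_spec_aux targets searched edges
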